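-- pv_equiv track=rewrite | github.com/raven2cz/l10n-pathfinder-wotr-cs | src/wotr_resp_parser.py | _best_mapping_for_ids
-- ===== SOURCE A (Python) =====
-- from typing import Dict, List, Tuple, Optional
--
-- def _best_mapping_for_ids(candidates: List[Tuple[str, Dict[str,str]]],
--                           expected: Optional[set]) -> Tuple[str, Dict[str,str], Dict[str,int]]:
--     """
--     Ze seznamu kandidátů [(name, map)] vybere ten s největším překryvem k expected id,
--     případně s největší velikostí mapy, když expected není k dispozici.
--     """
--     stats = {
--         "parsed_tab": 0,
--         "parsed_colon": 0,
--         "parsed_pipe": 0,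
--         "parsed_minus": 0,
--         "parsed_spaces": 0,
--         "overlap": 0
--     }
--     best_name = "none"
--     best_map: Dict[str,str] = {}
--     best_score = -1
--
--     for name, mp in candidates:
--         count = len(mp)
--         if name == "tab":    stats["parsed_tab"]    = count
--         if name == "colon":  stats["parsed_colon"]  = count
--         if name == "pipe":   stats["parsed_pipe"]   = count
--         if name == "minus":  stats["parsed_minus"]  = count
--         if name == "spaces": stats["parsed_spaces"] = count
--
--         if expected:
--             ov = sum(1 for k in mp.keys() if k in expected)
--             score = (ov * 100000) + count  # primárně overlap, sekundárně velikost
--         else: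
--             ov = 0
--             score = count
--
--         if ov > stats["overlap"]:
--             stats["overlap"] = ov
--
--         if score > best_score:
--             best_score = score
--             best_name  = name
--             best_map   = mp
--
--     return best_name, best_map, stats
-- ===== SOURCE B (Python) =====
-- from typing import Dict, List, Tuple, Optional
--
-- def _best_mapping_for_ids(candidates: List[Tuple[str, Dict[str, str]]],
--                           expected: Optional[set]) -> Tuple[str, Dict[str, str], Dict[str, int]]:
--     def last_size(key):
--         sizes = [len(mp) for name, mp in candidates if name == key]
--         return sizes[-1] if sizes else 0
--
--     if expected:
--         def ov(mp):
--             return sum(1 for k in mp if k in expected)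
--         key_fn = lambda c: ov(c[1]) * 100000 + len(c[1])
--         overlap = max((ov(mp) for _, mp in candidates), default=0)
--     else:
--         key_fn = lambda c: len(c[1])
--         overlap = 0
--
--     stats = {
--         "parsed_tab": last_size("tab"),
--         "parsed_colon": last_size("colon"),
--         "parsed_pipe": last_size("pipe"),
--         "parsed_minus": last_size("minus"),
--         "parsed_spaces": last_size("spaces"),
--         "overlap": overlap,
--     }
--
--     if not candidates:
--         return "none", {}, stats
--     best_name, best_map = max(candidates, key=key_fn)
--     return best_name, best_map, stats
-- ===== Notes on version B (the rewrite author's own statement) =====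
-- stated objective: alternative
-- what changed: Replaces A's single fused loop carrying (stats, best_name, best_map, best_score) with separate passes: per-name last-write scans for the parsed_* stats, a max over per-candidate overlaps for stats['overlap'], and one max(candidates, key=score) call (first maximal element) for the winner.
import Mathlib
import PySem

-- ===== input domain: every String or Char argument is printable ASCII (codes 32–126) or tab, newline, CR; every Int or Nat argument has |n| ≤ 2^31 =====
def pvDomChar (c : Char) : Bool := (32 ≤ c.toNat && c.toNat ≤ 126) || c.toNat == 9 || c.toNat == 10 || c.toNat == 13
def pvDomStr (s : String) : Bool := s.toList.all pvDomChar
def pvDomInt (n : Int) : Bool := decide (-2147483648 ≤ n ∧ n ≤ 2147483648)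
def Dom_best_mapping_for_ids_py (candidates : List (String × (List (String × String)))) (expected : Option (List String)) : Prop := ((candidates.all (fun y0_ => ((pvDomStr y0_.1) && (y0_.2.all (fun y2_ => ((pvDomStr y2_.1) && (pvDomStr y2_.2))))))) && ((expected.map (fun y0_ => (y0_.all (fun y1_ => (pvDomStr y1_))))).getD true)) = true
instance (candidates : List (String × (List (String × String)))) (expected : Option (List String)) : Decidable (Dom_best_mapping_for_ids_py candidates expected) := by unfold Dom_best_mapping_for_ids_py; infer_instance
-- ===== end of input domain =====

-- B is the same selection expressed as separate passes: stats by per-name last-write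
-- scans and a max over overlaps, the winner by a single max with a score key (objective:
-- alternative decomposition, same cost).

-- ===== PORT A =====
-- loop body of A's single fused for-loop, as a named helper
def pvAStep (expected : Option (List String))
    (st : PySem.Dict String Int × String × List (String × String) × Int)
    (c : String × List (String × String)) :
    PySem.Dict String Int × String × List (String × String) × Int :=
  let name := c.1
  let mp := c.2
  let count : Int := mp.length
  let stats := st.1
  let stats := if name == "tab" then stats.insert "parsed_tab" count else stats
  let stats := if name == "colon" then stats.insert "parsed_colon" count else stats
  let stats := if name == "pipe" then stats.insert "parsed_pipe" count else stats
  let stats := if name == "minus" then stats.insert "parsed_minus" count else stats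
  let stats := if name == "spaces" then stats.insert "parsed_spaces" count else stats
  -- if expected: ov = sum(1 for k in mp.keys() if k in expected); score = ov*100000+count
  let ovScore : Int × Int :=
    match expected with
    | some l =>
        if !l.isEmpty then
          let ov : Int := ((mp.map Prod.fst).countP (fun k => l.contains k) : Nat)
          (ov, ov * 100000 + count)
        else (0, count)
    | none => (0, count)
  let stats := if ovScore.1 > stats.getD "overlap" 0 then stats.insert "overlap" ovScore.1 else stats
  if ovScore.2 > st.2.2.2 then (stats, name, mp, ovScore.2) else (stats, st.2.1, st.2.2.1, st.2.2.2)

def best_mapping_for_ids_py (candidates : List (String × (List (String × String)))) (expected : Option (List String)) : String × (List (String × String)) × (List (String × Int)) :=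
  let init : PySem.Dict String Int × String × List (String × String) × Int :=
    (PySem.Dict.ofList [("parsed_tab", (0 : Int)), ("parsed_colon", 0), ("parsed_pipe", 0),
                        ("parsed_minus", 0), ("parsed_spaces", 0), ("overlap", 0)],
     "none", ([] : List (String × String)), (-1 : Int))
  let r := candidates.foldl (pvAStep expected) init
  (r.2.1, r.2.2.1, r.1.items)

-- ===== PORT B =====
-- sizes = [len(mp) for name, mp in candidates if name == key]; sizes[-1] if sizes else 0
def pvAltLastSize (candidates : List (String × (List (String × String)))) (key : String) : Int :=
  let sizes := (candidates.filter (fun c => c.1 == key)).map (fun c => (c.2.length : Int))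
  PySem.List.pyGetD sizes (-1) 0

-- ov(mp) = sum(1 for k in mp if k in expected)
def pvAltOv (exp : List String) (mp : List (String × String)) : Int :=
  ((mp.map Prod.fst).countP (fun k => exp.contains k) : Nat)

-- key_fn of Source B (one closure or the other, depending on truthiness of expected)
def pvAltKeyFn (expected : Option (List String)) : String × List (String × String) → Int :=
  match expected with
  | some l =>
      if !l.isEmpty then (fun c => pvAltOv l c.2 * 100000 + c.2.length)
      else (fun c => (c.2.length : Int))
  | none => fun c => (c.2.length : Int)

def best_mapping_for_ids_py_alt (candidates : List (String × (List (String × String)))) (expected : Option (List String)) : String × (List (String × String)) × (List (String × Int)) :=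
  let overlap : Int :=
    match expected with
    | some l =>
        if !l.isEmpty then
          PySem.List.maxD (candidates.map (fun c => pvAltOv l c.2)) (fun x => x) 0
        else 0
    | none => 0
  let stats : List (String × Int) :=
    [("parsed_tab", pvAltLastSize candidates "tab"),
     ("parsed_colon", pvAltLastSize candidates "colon"),
     ("parsed_pipe", pvAltLastSize candidates "pipe"),
     ("parsed_minus", pvAltLastSize candidates "minus"),
     ("parsed_spaces", pvAltLastSize candidates "spaces"),
     ("overlap", overlap)]
  match PySem.List.max? candidates (pvAltKeyFn expected) with
  | none => ("none", [], stats)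
  | some best => (best.1, best.2, stats)

-- ===== PRECONDITION & SPEC =====
def Spec_best_mapping_for_ids_py (candidates : List (String × (List (String × String)))) (expected : Option (List String)) (out : String × (List (String × String)) × (List (String × Int))) : Prop := out = best_mapping_for_ids_py_alt candidates expected
instance (candidates : List (String × (List (String × String)))) (expected : Option (List String)) (out : String × (List (String × String)) × (List (String × Int))) : Decidable (Spec_best_mapping_for_ids_py candidates expected out) := by unfold Spec_best_mapping_for_ids_py; infer_instance

-- ===== CLAIM (what is proved, stated in full; the proofs are below) =====
def Claim_equal_best_mapping_for_ids_py : Prop := ∀ (candidates : List (String × (List (String × String)))) (expected : Option (List String)), Dom_best_mapping_for_ids_py candidates expected → Spec_best_mapping_for_ids_py candidates expected (best_mapping_for_ids_py candidates expected)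

-- ===== LEMMAS AND PROOFS =====

-- proof-only helpers: the value of each of B's passes on a prefix of the candidate list
def pvOvMax (expected : Option (List String)) (xs : List (String × (List (String × String)))) : Int :=
  match expected with
  | some l =>
      if !l.isEmpty then PySem.List.maxD (xs.map (fun c => pvAltOv l c.2)) (fun x => x) 0 else 0
  | none => 0

def pvStatsOf (expected : Option (List String)) (xs : List (String × (List (String × String)))) : PySem.Dict String Int :=
  PySem.Dict.mk
    [("parsed_tab", pvAltLastSize xs "tab"), ("parsed_colon", pvAltLastSize xs "colon"),
     ("parsed_pipe", pvAltLastSize xs "pipe"), ("parsed_minus", pvAltLastSize xs "minus"),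
     ("parsed_spaces", pvAltLastSize xs "spaces"), ("overlap", pvOvMax expected xs)]

def pvSelOf (expected : Option (List String)) (xs : List (String × (List (String × String)))) : String × List (String × String) × Int :=
  match PySem.List.max? xs (pvAltKeyFn expected) with
  | none => ("none", [], -1)
  | some b => (b.1, b.2, pvAltKeyFn expected b)

lemma pvAltLastSize_append (xs : List (String × (List (String × String)))) (c : String × (List (String × String))) (key : String) :
    pvAltLastSize (xs ++ [c]) key = if c.1 == key then (c.2.length : Int) else pvAltLastSize xs key := by
  unfold pvAltLastSize
  by_cases h : c.1 == key
  · simp [h, List.filter_append, PySem.List.pyGetD_neg_one_append_singleton]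
  · simp [h, List.filter_append]

lemma pvMax?_append {α κ : Type} [LT κ] [DecidableLT κ] (xs : List α) (a : α) (key : α → κ) :
    PySem.List.max? (xs ++ [a]) key =
      (match PySem.List.max? xs key with
       | none => some a
       | some m => if key m < key a then some a else some m) := by
  simp only [PySem.List.max?, List.foldl_append, List.foldl_cons, List.foldl_nil]
  rfl

lemma pvAltOv_nonneg (l : List String) (mp : List (String × String)) : 0 ≤ pvAltOv l mp := by
  unfold pvAltOv; exact Int.natCast_nonneg _

def pvOvC (expected : Option (List String)) (c : String × (List (String × String))) : Int :=
  match expected with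
  | some l => if !l.isEmpty then pvAltOv l c.2 else 0
  | none => 0

lemma pvOvMax_append (expected : Option (List String)) (xs : List (String × (List (String × String)))) (c : String × (List (String × String))) :
    pvOvMax expected (xs ++ [c]) =
      if pvOvMax expected xs < pvOvC expected c then pvOvC expected c else pvOvMax expected xs := by
  cases expected with
  | none => simp [pvOvMax, pvOvC]
  | some l =>
    by_cases h : !l.isEmpty
    · simp only [pvOvMax, pvOvC, h, if_true, List.map_append, List.map_cons, List.map_nil]
      unfold PySem.List.maxD
      rw [pvMax?_append (xs.map (fun c => pvAltOv l c.2)) (pvAltOv l c.2) (fun x => x)]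
      cases hm : PySem.List.max? (xs.map (fun c => pvAltOv l c.2)) (fun x => x) with
      | none =>
        simp only [Option.getD_none, Option.getD_some]
        have h0 := pvAltOv_nonneg l c.2
        by_cases hlt : (0 : Int) < pvAltOv l c.2
        · simp [hlt]
        · have : pvAltOv l c.2 = 0 := le_antisymm (not_lt.mp hlt) h0
          simp [this]
      | some m =>
        simp only [Option.getD_some]
        split_ifs <;> rfl
    · simp [pvOvMax, pvOvC, h]

-- the five conditional name-inserts on the literal six-key dict, componentwise
lemma pvStats5 (name : String) (count t co pi mi sp o : Int) :
    (let stats := PySem.Dict.mk [("parsed_tab", t), ("parsed_colon", co), ("parsed_pipe", pi),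
                                 ("parsed_minus", mi), ("parsed_spaces", sp), ("overlap", o)]
     let stats := if name == "tab" then stats.insert "parsed_tab" count else stats
     let stats := if name == "colon" then stats.insert "parsed_colon" count else stats
     let stats := if name == "pipe" then stats.insert "parsed_pipe" count else stats
     let stats := if name == "minus" then stats.insert "parsed_minus" count else stats
     if name == "spaces" then stats.insert "parsed_spaces" count else stats) =
    PySem.Dict.mk [("parsed_tab", if name == "tab" then count else t),
                   ("parsed_colon", if name == "colon" then count else co),
                   ("parsed_pipe", if name == "pipe" then count else pi),
                   ("parsed_minus", if name == "minus" then count else mi),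
                   ("parsed_spaces", if name == "spaces" then count else sp),
                   ("overlap", o)] := by
  simp only []
  split_ifs <;> rfl

lemma pvGetD_overlap (t co pi mi sp o : Int) :
    (PySem.Dict.mk [("parsed_tab", t), ("parsed_colon", co), ("parsed_pipe", pi),
                    ("parsed_minus", mi), ("parsed_spaces", sp), ("overlap", o)]).getD "overlap" 0 = o := rfl

lemma pvInsert_overlap (t co pi mi sp o v : Int) :
    (PySem.Dict.mk [("parsed_tab", t), ("parsed_colon", co), ("parsed_pipe", pi),
                    ("parsed_minus", mi), ("parsed_spaces", sp), ("overlap", o)]).insert "overlap" v =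
    PySem.Dict.mk [("parsed_tab", t), ("parsed_colon", co), ("parsed_pipe", pi),
                   ("parsed_minus", mi), ("parsed_spaces", sp), ("overlap", v)] := rfl

lemma pvKeyFn_nonneg (expected : Option (List String)) (c : String × List (String × String)) :
    0 ≤ pvAltKeyFn expected c := by
  unfold pvAltKeyFn
  cases expected with
  | none => exact Int.natCast_nonneg _
  | some l =>
    by_cases h : !l.isEmpty
    · simp only [h, if_true]
      have h1 := pvAltOv_nonneg l c.2
      have h2 : (0 : Int) ≤ c.2.length := Int.natCast_nonneg _
      nlinarith
    · simp only [h, Bool.false_eq_true, if_false]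
      exact Int.natCast_nonneg _

lemma pvStep_eq (expected : Option (List String)) (xs : List (String × (List (String × String)))) (c : String × (List (String × String))) :
    pvAStep expected (pvStatsOf expected xs, pvSelOf expected xs) c =
      (pvStatsOf expected (xs ++ [c]), pvSelOf expected (xs ++ [c])) := by
  have hov : (match expected with
      | some l =>
          if !l.isEmpty then
            let ov : Int := ((c.2.map Prod.fst).countP (fun k => l.contains k) : Nat)
            (ov, ov * 100000 + (c.2.length : Int))
          else ((0 : Int), (c.2.length : Int))
      | none => ((0 : Int), (c.2.length : Int))) =
      (pvOvC expected c, pvAltKeyFn expected c) := by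
    cases expected with
    | none => rfl
    | some l =>
      by_cases h : !l.isEmpty
      · simp [h, pvOvC, pvAltOv, pvAltKeyFn]
      · simp [h, pvOvC, pvAltKeyFn]
  unfold pvAStep
  simp only [pvStatsOf, pvStats5, hov]
  rw [pvGetD_overlap]
  have hstats :
      (if pvOvC expected c > pvOvMax expected xs
       then (PySem.Dict.mk [("parsed_tab", if c.1 == "tab" then (c.2.length : Int) else pvAltLastSize xs "tab"),
                   ("parsed_colon", if c.1 == "colon" then (c.2.length : Int) else pvAltLastSize xs "colon"),
                   ("parsed_pipe", if c.1 == "pipe" then (c.2.length : Int) else pvAltLastSize xs "pipe"),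
                   ("parsed_minus", if c.1 == "minus" then (c.2.length : Int) else pvAltLastSize xs "minus"),
                   ("parsed_spaces", if c.1 == "spaces" then (c.2.length : Int) else pvAltLastSize xs "spaces"),
                   ("overlap", pvOvMax expected xs)]).insert "overlap" (pvOvC expected c)
       else PySem.Dict.mk [("parsed_tab", if c.1 == "tab" then (c.2.length : Int) else pvAltLastSize xs "tab"),
                   ("parsed_colon", if c.1 == "colon" then (c.2.length : Int) else pvAltLastSize xs "colon"),
                   ("parsed_pipe", if c.1 == "pipe" then (c.2.length : Int) else pvAltLastSize xs "pipe"),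
                   ("parsed_minus", if c.1 == "minus" then (c.2.length : Int) else pvAltLastSize xs "minus"),
                   ("parsed_spaces", if c.1 == "spaces" then (c.2.length : Int) else pvAltLastSize xs "spaces"),
                   ("overlap", pvOvMax expected xs)]) = pvStatsOf expected (xs ++ [c]) := by
    unfold pvStatsOf
    rw [pvOvMax_append expected xs c]
    simp only [pvAltLastSize_append, gt_iff_lt]
    by_cases hlt : pvOvMax expected xs < pvOvC expected c
    · simp only [hlt, if_true, pvInsert_overlap]
    · simp only [hlt, if_false]
  rw [hstats]
  -- selection component
  unfold pvSelOf
  rw [pvMax?_append xs c (pvAltKeyFn expected)]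
  cases hm : PySem.List.max? xs (pvAltKeyFn expected) with
  | none =>
    have hpos : pvAltKeyFn expected c > (-1 : Int) := lt_of_lt_of_le (by norm_num) (pvKeyFn_nonneg expected c)
    simp [hpos]
    rfl
  | some b =>
    by_cases hlt : pvAltKeyFn expected b < pvAltKeyFn expected c
    · simp [hlt, gt_iff_lt]
      rfl
    · simp [hlt, gt_iff_lt]
      rfl

lemma pvLoop (expected : Option (List String)) (xs : List (String × (List (String × String)))) :
    xs.foldl (pvAStep expected)
      (PySem.Dict.ofList [("parsed_tab", (0 : Int)), ("parsed_colon", 0), ("parsed_pipe", 0),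
                          ("parsed_minus", 0), ("parsed_spaces", 0), ("overlap", 0)],
       "none", ([] : List (String × String)), (-1 : Int)) =
      (pvStatsOf expected xs, pvSelOf expected xs) := by
  induction xs using List.reverseRecOn with
  | nil =>
    cases expected with
    | none => rfl
    | some l => cases l <;> rfl
  | append_singleton xs c ih =>
    rw [List.foldl_append, ih, List.foldl_cons, List.foldl_nil, pvStep_eq]

-- ===== VERDICT (by name: the statement is the Claim_ definition above) =====
theorem best_mapping_for_ids_py_spec : Claim_equal_best_mapping_for_ids_py := by
  intro candidates expected _
  unfold Spec_best_mapping_for_ids_py best_mapping_for_ids_py best_mapping_for_ids_py_alt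
  simp only [pvLoop]
  unfold pvSelOf pvStatsOf pvOvMax
  cases hm : PySem.List.max? candidates (pvAltKeyFn expected) <;> rfl
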